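-- pv_equiv track=rewrite | github.com/zoskar/Binary_search | Large to Small Sort.py | solve
-- ===== SOURCE A (Python) =====
-- def solve(nums):
--     nums = sorted(nums, reverse=True)
--     res = []
--     while len(nums) > 1:
--         res.append(nums[0])
--         res.append(nums[-1])
--         del(nums[0])
--         del(nums[-1])
--     if len(nums) == 1:
--         res.append(nums[0])
--     return res
-- ===== SOURCE B (Python) =====
-- def solve(nums):
--     # sort once ascending, then pair the largest half (reversed view) with the
--     # smallest half and emit each pair; odd length leaves the median for the end
--     s = sorted(nums)
--     n = len(s)
--     res = []
--     for a, b in zip(reversed(s), s[:n // 2]):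
--         res.append(a)
--         res.append(b)
--     if n % 2:
--         res.append(s[n // 2])
--     return res
-- ===== Notes on version B (the rewrite author's own statement) =====
-- stated objective: faster
-- what changed: Instead of repeatedly deleting the first and last element of a descending-sorted list (each del is O(n)), B sorts once ascending and zips the reversed list with its first half, emitting (largest, smallest) pairs in one linear pass plus the median for odd length.
import Mathlib
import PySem

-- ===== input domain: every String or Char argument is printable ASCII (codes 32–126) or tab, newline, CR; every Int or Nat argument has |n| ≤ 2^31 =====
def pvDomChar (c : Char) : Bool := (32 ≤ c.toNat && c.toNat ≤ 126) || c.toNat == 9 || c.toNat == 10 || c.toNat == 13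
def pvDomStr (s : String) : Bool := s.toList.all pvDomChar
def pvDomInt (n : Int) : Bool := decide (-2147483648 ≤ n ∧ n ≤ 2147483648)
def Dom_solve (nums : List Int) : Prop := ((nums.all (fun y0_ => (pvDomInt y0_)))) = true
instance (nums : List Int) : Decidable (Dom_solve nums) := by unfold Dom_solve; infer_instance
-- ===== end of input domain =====

-- B sorts once and walks the sorted list from both ends (via zip with its reverse)
-- instead of A's repeated deletion at both ends of a descending-sorted list.

-- ===== PORT A =====
-- A's while loop: res.append(nums[0]); res.append(nums[-1]); del nums[0]; del nums[-1]
-- nums[0] is headI and nums[-1] is getLast?.getD 0: both in range here since the loop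
-- body runs only with len(nums) > 1, so the defaults are never used.
def solveLoop (nums res : List Int) : List Int :=
  if _h : 1 < nums.length then
    solveLoop nums.tail.dropLast (res ++ [nums.headI, nums.getLast?.getD 0])
  else if nums.length = 1 then res ++ [nums.headI]
  else res
termination_by nums.length
decreasing_by simp [List.length_dropLast, List.length_tail]; omega

def solve (nums : List Int) : List Int :=
  solveLoop (PySem.List.sorted nums (fun x => x) true) []

-- ===== PORT B =====
def solve_alt (nums : List Int) : List Int :=
  let s := PySem.List.sorted nums (fun x => x) false
  let n := s.length
  let res := (List.zip s.reverse (PySem.List.slice s none (some ((n / 2 : Nat) : Int)))).foldl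
      (fun res ab => res ++ [ab.1, ab.2]) []
  if n % 2 = 1 then res ++ [PySem.List.pyGetD s ((n / 2 : Nat) : Int) 0] else res

-- ===== PRECONDITION & SPEC =====
def Spec_solve (nums : List Int) (out : List Int) : Prop := out = solve_alt nums
instance (nums : List Int) (out : List Int) : Decidable (Spec_solve nums out) := by unfold Spec_solve; infer_instance

-- ===== CLAIM (what is proved, stated in full; the proofs are below) =====
def Claim_equal_solve : Prop := ∀ (nums : List Int), Dom_solve nums → Spec_solve nums (solve nums)

-- ===== LEMMAS AND PROOFS =====

-- the accumulator of A's loop is just prefixed to the rest of the output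
lemma solveLoop_acc : ∀ (l res : List Int), solveLoop l res = res ++ solveLoop l []
  | l, res => by
    unfold solveLoop
    split
    · rw [solveLoop_acc l.tail.dropLast (res ++ _), solveLoop_acc l.tail.dropLast ([] ++ _)]
      simp
    · split <;> simp
termination_by l _ => l.length
decreasing_by all_goals
  have hl : l.tail.dropLast.length = l.length - 1 - 1 := by simp
  omega

-- zipping ignores a longer left tail
lemma zip_concat_left {α β : Type} (x : α) : ∀ (t : List β) (l : List α),
    t.length ≤ l.length → (l ++ [x]).zip t = l.zip t
  | [], l, _ => by simp
  | c :: t', [], h => by simp at h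
  | c :: t', d :: l', h => by
    simp only [List.cons_append, List.zip_cons_cons]
    rw [zip_concat_left x t' l' (by simpa using h)]

-- A's loop on the reverse of s = B's interleave of s
lemma solveLoop_weave : ∀ (s : List Int), solveLoop s.reverse [] =
    (List.zip s.reverse (s.take (s.length / 2))).flatMap (fun ab => [ab.1, ab.2]) ++
      (if s.length % 2 = 1 then [s.getD (s.length / 2) 0] else [])
  | [] => by simp [solveLoop]
  | [x] => by simp [solveLoop]
  | a :: c :: t => by
    rcases (c :: t).eq_nil_or_concat with h | ⟨m, b, hm⟩
    · simp at h
    simp only [List.concat_eq_append] at hm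
    rw [hm]
    have hrev : (a :: (m ++ [b])).reverse = b :: (m.reverse ++ [a]) := by simp
    have hlen : (a :: (m ++ [b])).length = m.length + 2 := by simp
    rw [hrev, hlen]
    have hstep : solveLoop (b :: (m.reverse ++ [a])) [] = b :: a :: solveLoop m.reverse [] := by
      rw [solveLoop]
      have hc : 1 < (b :: (m.reverse ++ [a])).length := by simp
      rw [dif_pos hc]
      have h1 : (b :: (m.reverse ++ [a])).tail.dropLast = m.reverse := by
        simp
      have h2 : (b :: (m.reverse ++ [a])).getLast?.getD 0 = a := by
        rw [show b :: (m.reverse ++ [a]) = (b :: m.reverse) ++ [a] by simp,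
          List.getLast?_concat]
        rfl
      rw [h1, h2]
      simp only [List.headI]
      rw [solveLoop_acc]
      simp
    rw [hstep]
    have hlt : m.length < (c :: t).length := by
      have := congrArg List.length hm
      simp only [List.length_cons, List.length_append] at this ⊢
      omega
    have IH := solveLoop_weave m
    rw [IH]
    -- now compute the RHS for a :: m ++ [b]
    have hdiv : (m.length + 2) / 2 = m.length / 2 + 1 := by omega
    have hmod : (m.length + 2) % 2 = m.length % 2 := by omega
    rw [hdiv, hmod]
    have htake : (a :: (m ++ [b])).take (m.length / 2 + 1) = a :: m.take (m.length / 2) := by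
      rw [List.take_succ_cons, List.take_append_of_le_length (by omega)]
    rw [htake]
    rw [List.zip_cons_cons]
    rw [zip_concat_left a (m.take (m.length / 2)) m.reverse (by simp)]
    have hget : (if m.length % 2 = 1 then [(a :: (m ++ [b])).getD (m.length / 2 + 1) 0] else [])
        = (if m.length % 2 = 1 then [m.getD (m.length / 2) 0] else []) := by
      split
      · next hodd =>
        have hml : m.length / 2 < m.length := by omega
        congr 1
        rw [List.getD_cons_succ]
        rw [List.getD_eq_getElem?_getD, List.getElem?_append_left hml,
          ← List.getD_eq_getElem?_getD]
      · rfl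
    rw [hget]
    simp
termination_by s => s.length
decreasing_by simp only [List.length_cons] at hlt ⊢; omega

-- Python's sorted(xs, reverse=True) on ints is the reverse of sorted(xs)
lemma sorted_rev_eq_reverse (nums : List Int) :
    PySem.List.sorted nums (fun x => x) true =
      (PySem.List.sorted nums (fun x => x) false).reverse := by
  have hperm : (PySem.List.sorted nums (fun x => x) true).reverse.Perm nums :=
    (List.reverse_perm _).trans (PySem.List.sorted_perm ..)
  have hpw : (PySem.List.sorted nums (fun x => x) true).reverse.Pairwise (· ≤ ·) := by
    rw [List.pairwise_reverse]
    exact PySem.List.sorted_pairwise_rev ..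
  have h := PySem.List.sorted_id_eq_of_perm_of_pairwise _ _ hperm hpw
  rw [h, List.reverse_reverse]

-- ===== VERDICT (by name: the statement is the Claim_ definition above) =====
theorem solve_spec : Claim_equal_solve := by
  intro nums _
  unfold Spec_solve solve solve_alt
  rw [sorted_rev_eq_reverse, solveLoop_weave]
  simp only [PySem.List.slice_to_natCast, PySem.List.pyGetD_natCast,
    PySem.List.foldl_append_eq_flatMap, List.nil_append]
  split <;> simp
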